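-- pv_equiv track=rewrite | github.com/maticamisay/python-estudio | u10-ejercicios/2.py | encontrarMaximoAnterior
-- ===== SOURCE A (Python) =====
-- def encontrarMaximoAnterior(array):
--     if len(array) < 2:
--         return None  # No hay elemento anterior al máximo
--
--     max_idx = 0
--     for i in range(1, len(array)):
--         if array[i] > array[max_idx]:
--             max_idx = i
--
--     if max_idx == 0:
--         return None  # El máximo está en la primera posición, no hay anterior
--
--     return array[max_idx - 1]
-- ===== SOURCE B (Python) =====
-- def encontrarMaximoAnterior(array):
--     if len(array) < 2:
--         return None
--     # right-to-left single pass: track the maximum of the suffix seen so far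
--     # and the predecessor of its leftmost occurrence (None while it is at the front)
--     m = array[-1]
--     ans = None
--     for x in reversed(array[:-1]):
--         if x >= m:
--             m = x
--             ans = None
--         elif ans is None:
--             ans = x
--     return ans
-- ===== Notes on version B (the rewrite author's own statement) =====
-- stated objective: alternative
-- what changed: Replaces A's left-to-right argmax-index loop followed by indexing with a right-to-left single pass that carries (suffix maximum, predecessor of its leftmost occurrence) and never touches indices; >= updates from the right select the leftmost maximum, matching A's strict-> first-maximum rule.
import Mathlib
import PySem

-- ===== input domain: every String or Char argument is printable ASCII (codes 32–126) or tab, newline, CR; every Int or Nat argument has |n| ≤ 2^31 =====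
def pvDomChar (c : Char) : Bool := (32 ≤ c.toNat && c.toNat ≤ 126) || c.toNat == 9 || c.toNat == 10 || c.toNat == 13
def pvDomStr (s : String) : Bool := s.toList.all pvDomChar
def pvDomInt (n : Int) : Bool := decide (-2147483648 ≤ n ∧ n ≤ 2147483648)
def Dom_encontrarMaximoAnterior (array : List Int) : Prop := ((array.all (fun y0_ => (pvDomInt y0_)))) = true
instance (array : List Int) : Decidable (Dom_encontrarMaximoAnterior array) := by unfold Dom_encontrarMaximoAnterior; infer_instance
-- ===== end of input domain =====

-- B replaces A's left-to-right argmax-index loop with a right-to-left pass carrying (suffix max, predecessor of its leftmost occurrence); same O(n) cost, a genuinely different traversal.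


-- ===== PORT A =====
def encontrarMaximoAnterior (array : List Int) : Option Int :=
  if PySem.List.len array < 2 then none
  else
    let maxIdx := (PySem.List.pyRange 1 (PySem.List.len array) 1).foldl
      (fun m i => if PySem.List.pyGetD array i 0 > PySem.List.pyGetD array m 0 then i else m) 0
    if maxIdx = 0 then none
    else PySem.List.pyGet? array (maxIdx - 1)

-- ===== PORT B =====
-- loop body of Source B's right-to-left scan over reversed(array[:-1])
def pvStepB (st : Int × Option Int) (x : Int) : Int × Option Int :=
  if x ≥ st.1 then (x, none)
  else if st.2 = none then (st.1, some x)
  else st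

def encontrarMaximoAnterior_alt (array : List Int) : Option Int :=
  if PySem.List.len array < 2 then none
  else
    let st := ((PySem.List.slice array none (some (-1))).reverse).foldl pvStepB
      (PySem.List.pyGetD array (-1) 0, none)
    st.2

-- ===== PRECONDITION & SPEC =====
def Spec_encontrarMaximoAnterior (array : List Int) (out : Option Int) : Prop := out = encontrarMaximoAnterior_alt array
instance (array : List Int) (out : Option Int) : Decidable (Spec_encontrarMaximoAnterior array out) := by unfold Spec_encontrarMaximoAnterior; infer_instance

-- ===== CLAIM (what is proved, stated in full; the proofs are below) =====
def Claim_equal_encontrarMaximoAnterior : Prop := ∀ (array : List Int), Dom_encontrarMaximoAnterior array → Spec_encontrarMaximoAnterior array (encontrarMaximoAnterior array)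

-- ===== LEMMAS AND PROOFS =====

-- A's loop returns the first argmax: a Nat index j < n that is maximal among
-- positions < n and strictly greater than every earlier position's value.
lemma loopA_char (a : List Int) (n : Nat) (h1 : 1 ≤ n) :
    ∃ j : Nat, j < n ∧
      (PySem.List.pyRange 1 (n : Int) 1).foldl
        (fun m i => if PySem.List.pyGetD a i 0 > PySem.List.pyGetD a m 0 then i else m) 0 = (j : Int) ∧
      (∀ k, k < n → a.getD k 0 ≤ a.getD j 0) ∧
      (∀ k, k < j → a.getD k 0 < a.getD j 0) := by
  induction n, h1 using Nat.le_induction with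
  | base =>
      refine ⟨0, by omega, ?_, ?_, ?_⟩
      · rw [PySem.List.pyRange_one_eq_nil (by norm_num)]; rfl
      · intro k hk; interval_cases k; exact le_refl _
      · intro k hk; omega
  | succ n hn ih =>
      obtain ⟨j, hjn, hfold, hmax, hfirst⟩ := ih
      have hcast : ((n + 1 : Nat) : Int) = (n : Int) + 1 := by push_cast; ring
      rw [hcast, PySem.List.pyRange_one_succ_right (by exact_mod_cast hn),
        List.foldl_append, hfold]
      simp only [List.foldl_cons, List.foldl_nil, PySem.List.pyGetD_natCast]
      by_cases hc : a.getD n 0 > a.getD j 0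
      · refine ⟨n, by omega, by rw [if_pos hc], ?_, ?_⟩
        · intro k hk
          rcases Nat.lt_succ_iff_lt_or_eq.mp hk with hk' | hk'
          · exact le_of_lt (lt_of_le_of_lt (hmax k hk') hc)
          · simp [hk']
        · intro k hk
          exact lt_of_le_of_lt (hmax k hk) hc
      · refine ⟨j, by omega, by rw [if_neg hc], ?_, hfirst⟩
        intro k hk
        rcases Nat.lt_succ_iff_lt_or_eq.mp hk with hk' | hk'
        · exact hmax k hk'
        · subst hk'; exact not_lt.mp hc

-- B's right-to-left scan (as a foldr over the dropped-last prefix) computes the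
-- suffix maximum and the predecessor of the first argmax of p ++ [z].
lemma loopB_char (p : List Int) (z : Int) :
    ∃ j : Nat, j < (p ++ [z]).length ∧
      (∀ k, k < (p ++ [z]).length → (p ++ [z]).getD k 0 ≤ (p ++ [z]).getD j 0) ∧
      (∀ k, k < j → (p ++ [z]).getD k 0 < (p ++ [z]).getD j 0) ∧
      p.foldr (fun x st => pvStepB st x) (z, none)
        = ((p ++ [z]).getD j 0, if j = 0 then none else some ((p ++ [z]).getD (j - 1) 0)) := by
  induction p with
  | nil =>
      refine ⟨0, by simp, ?_, by omega, by simp⟩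
      intro k hk; simp at hk; subst hk; exact le_refl _
  | cons x p ih =>
      obtain ⟨j, hjn, hmax, hfirst, hfold⟩ := ih
      simp only [List.foldr_cons, hfold]
      by_cases hc : x ≥ (p ++ [z]).getD j 0
      · refine ⟨0, by simp, ?_, by omega, by unfold pvStepB; rw [if_pos hc]; simp⟩
        intro k hk
        cases k with
        | zero => exact le_refl _
        | succ k' =>
            have hk' : k' < (p ++ [z]).length := by
              simpa [List.length_cons] using hk
            calc ((x :: (p ++ [z])).getD (k' + 1) 0) = (p ++ [z]).getD k' 0 := by simp
              _ ≤ (p ++ [z]).getD j 0 := hmax k' hk'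
              _ ≤ x := hc
      · unfold pvStepB
        rw [if_neg hc]
        refine ⟨j + 1, by simpa using hjn, ?_, ?_, ?_⟩
        · intro k hk
          cases k with
          | zero =>
              simp only [List.cons_append, List.getD_cons_zero, List.getD_cons_succ]
              exact le_of_lt (lt_of_not_ge hc)
          | succ k' =>
              have hk' : k' < (p ++ [z]).length := by
                simpa [List.length_cons] using hk
              simpa using hmax k' hk'
        · intro k hk
          cases k with
          | zero =>
              simp only [List.cons_append, List.getD_cons_zero, List.getD_cons_succ]
              exact lt_of_not_ge hc
          | succ k' =>
              have hk' : k' < j := by omega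
              simpa using hfirst k' hk'
        · by_cases h0 : j = 0
          · subst h0
            simp
          · have : ¬ ((if j = 0 then (none : Option Int) else some ((p ++ [z]).getD (j - 1) 0)) = none) := by
              simp [h0]
            rw [if_neg this]
            simp only [if_neg h0]
            have : j + 1 - 1 = (j - 1) + 1 := by omega
            simp [this, h0]

-- uniqueness of the first argmax (both ports' characterisations pin the same index)
lemma firstmax_unique (a : List Int) (j1 j2 : Nat)
    (h1n : j1 < a.length) (h2n : j2 < a.length)
    (h1max : ∀ k, k < a.length → a.getD k 0 ≤ a.getD j1 0)
    (h2max : ∀ k, k < a.length → a.getD k 0 ≤ a.getD j2 0)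
    (h1first : ∀ k, k < j1 → a.getD k 0 < a.getD j1 0)
    (h2first : ∀ k, k < j2 → a.getD k 0 < a.getD j2 0) : j1 = j2 := by
  rcases lt_trichotomy j1 j2 with h | h | h
  · exact absurd (h2first j1 h) (not_lt.mpr (h1max j2 h2n))
  · exact h
  · exact absurd (h1first j2 h) (not_lt.mpr (h2max j1 h1n))

-- ===== VERDICT (by name: the statement is the Claim_ definition above) =====
theorem encontrarMaximoAnterior_spec : Claim_equal_encontrarMaximoAnterior := by
  intro a _
  unfold Spec_encontrarMaximoAnterior encontrarMaximoAnterior encontrarMaximoAnterior_alt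
  by_cases hlen : PySem.List.len a < 2
  · rw [if_pos hlen, if_pos hlen]
  · rw [if_neg hlen, if_neg hlen]
    have hlen2 : 2 ≤ a.length := by
      simp only [PySem.List.len_eq] at hlen; omega
    have hne : a ≠ [] := by intro h; subst h; simp at hlen2
    obtain ⟨jA, hjAn, hfoldA, hmaxA, hfirstA⟩ := loopA_char a a.length (by omega)
    obtain ⟨jB, hjBn, hmaxB, hfirstB, hfoldB⟩ := loopB_char a.dropLast (a.getLast hne)
    have hsplit : a.dropLast ++ [a.getLast hne] = a := List.dropLast_append_getLast hne
    rw [hsplit] at hjBn hmaxB hfirstB hfoldB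
    have hjeq : jA = jB := firstmax_unique a jA jB hjAn hjBn hmaxA hmaxB hfirstA hfirstB
    rw [PySem.List.len_eq, hfoldA]
    rw [PySem.List.slice_to_neg_one, List.foldl_reverse,
      PySem.List.pyGetD_neg_one a 0 hne, hfoldB, hjeq]
    by_cases h0 : jB = 0
    · simp [h0]
    · have hB0 : ((jB : Int)) ≠ 0 := by exact_mod_cast h0
      rw [if_neg hB0, if_neg h0]
      have hcast : (jB : Int) - 1 = ((jB - 1 : Nat) : Int) := by omega
      rw [hcast, PySem.List.pyGet?_natCast, List.getElem?_eq_getElem (by omega)]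
      simp [List.getElem?_eq_getElem (show jB - 1 < a.length by omega)]
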